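-- pv_equiv track=rewrite | github.com/danielweidman/pixmob-ir-reverse-engineering | python_tools/pixmob_conversion_funcs.py | split_run_length_list
-- ===== SOURCE A (Python) =====
-- def split_run_length_list(run_length_list, max_zeroes=6, max_ones=7, pulse_length=694):
--     # Split the run length lists into individual codes on runs of more zeroes longer than max_zeroes
--     # Returns list of list of ints
--     split_run_length_lists = []
--     start = 0
--     skip = False
--     for i, val in enumerate(run_length_list):
--         # check if too many zeros (an even index indicates it is a zero)
--         if val > max_zeroes * pulse_length and i % 2 == 1:
--             if not skip:
--                 split_run_length_lists.append(run_length_list[start:i])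
--             start = i+1
--             skip = False
--         # TODO consider throwing out any codes with a too long string of ones
--         if val > max_ones * pulse_length and i % 2 == 0:
--             skip = True
--     if not skip:
--         split_run_length_lists.append(run_length_list[start:])
--     return split_run_length_lists
-- ===== SOURCE B (Python) =====
-- def split_run_length_list(run_length_list, max_zeroes=6, max_ones=7, pulse_length=694):
--     # Two-pass re-implementation: collect the split boundaries first, then
--     # partition the list into segments and keep each segment whose even
--     # absolute indices carry no over-long run of ones.
--     zero_limit = max_zeroes * pulse_length
--     one_limit = max_ones * pulse_length
--     n = len(run_length_list)
--     cuts = [j for j in range(1, n, 2) if run_length_list[j] > zero_limit]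
--     out = []
--     start = 0
--     for end in cuts + [n]:
--         if not any(run_length_list[j] > one_limit for j in range(start, end, 2)):
--             out.append(run_length_list[start:end])
--         start = end + 1
--     return out
-- ===== Notes on version B (the rewrite author's own statement) =====
-- stated objective: alternative
-- what changed: Replaces A's single stateful scan (start/skip flags mutated per element) by two passes: first collect all odd-index split boundaries, then partition the list at those boundaries and keep each segment whose even absolute indices have no over-long ones-run.
import Mathlib
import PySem

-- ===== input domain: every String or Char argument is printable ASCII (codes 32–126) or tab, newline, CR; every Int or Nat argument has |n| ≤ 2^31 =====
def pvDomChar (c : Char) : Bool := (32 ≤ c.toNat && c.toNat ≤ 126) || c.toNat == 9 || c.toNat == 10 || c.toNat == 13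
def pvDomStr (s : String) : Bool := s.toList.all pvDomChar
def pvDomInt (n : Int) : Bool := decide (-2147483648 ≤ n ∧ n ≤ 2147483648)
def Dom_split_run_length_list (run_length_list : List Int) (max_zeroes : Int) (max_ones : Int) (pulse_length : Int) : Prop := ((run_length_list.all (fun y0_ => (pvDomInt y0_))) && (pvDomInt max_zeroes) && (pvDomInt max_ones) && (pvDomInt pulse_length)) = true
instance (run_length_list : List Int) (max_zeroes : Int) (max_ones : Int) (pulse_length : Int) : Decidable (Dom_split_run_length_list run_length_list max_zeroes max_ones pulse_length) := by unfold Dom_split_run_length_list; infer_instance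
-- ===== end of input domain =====

-- B replaces A's single stateful scan by a two-pass decomposition (collect split
-- boundaries, then partition and filter the segments); same cost, alternative structure.

-- ===== PORT A =====
-- Literal port of A: one fold over enumerate with state (result list, start, skip),
-- then the final conditional append of run_length_list[start:].
def split_run_length_list (run_length_list : List Int) (max_zeroes : Int) (max_ones : Int) (pulse_length : Int) : List (List Int) :=
  let st := (PySem.List.enumerate run_length_list 0).foldl
    (fun (st : List (List Int) × Int × Bool) (iv : Int × Int) =>
      -- if val > max_zeroes * pulse_length and i % 2 == 1: …
      let st1 : List (List Int) × Int × Bool :=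
        if iv.2 > max_zeroes * pulse_length ∧ PySem.Int.mod iv.1 2 = 1 then
          ((if st.2.2 = false then st.1 ++ [PySem.List.slice run_length_list (some st.2.1) (some iv.1)] else st.1),
           iv.1 + 1, false)
        else st
      -- if val > max_ones * pulse_length and i % 2 == 0: skip = True
      if iv.2 > max_ones * pulse_length ∧ PySem.Int.mod iv.1 2 = 0 then (st1.1, st1.2.1, true) else st1)
    ([], 0, false)
  if st.2.2 = false then st.1 ++ [PySem.List.slice run_length_list (some st.2.1) none] else st.1

-- ===== PORT B =====
-- Literal port of B (Source B): first pass collects boundary indices (odd j with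
-- run_length_list[j] > zero_limit), second pass folds over cuts ++ [n] partitioning
-- the list and keeping segments with no over-long ones-run on even absolute indices.
def split_run_length_list_alt (run_length_list : List Int) (max_zeroes : Int) (max_ones : Int) (pulse_length : Int) : List (List Int) :=
  let zero_limit := max_zeroes * pulse_length
  let one_limit := max_ones * pulse_length
  let n : Int := (run_length_list.length : Int)
  let cuts := (PySem.List.pyRange 1 n 2).filter
    (fun j => decide (PySem.List.pyGetD run_length_list j 0 > zero_limit))
  let st := (cuts ++ [n]).foldl
    (fun (st : List (List Int) × Int) (e : Int) =>
      ((if (PySem.List.pyRange st.2 e 2).any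
              (fun j => decide (PySem.List.pyGetD run_length_list j 0 > one_limit)) = false
        then st.1 ++ [PySem.List.slice run_length_list (some st.2) (some e)] else st.1),
       e + 1))
    ([], 0)
  st.1

-- ===== PRECONDITION & SPEC =====
def Spec_split_run_length_list (run_length_list : List Int) (max_zeroes : Int) (max_ones : Int) (pulse_length : Int) (out : List (List Int)) : Prop := out = split_run_length_list_alt run_length_list max_zeroes max_ones pulse_length
instance (run_length_list : List Int) (max_zeroes : Int) (max_ones : Int) (pulse_length : Int) (out : List (List Int)) : Decidable (Spec_split_run_length_list run_length_list max_zeroes max_ones pulse_length out) := by unfold Spec_split_run_length_list; infer_instance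

-- ===== CLAIM (what is proved, stated in full; the proofs are below) =====
def Claim_equal_split_run_length_list : Prop := ∀ (run_length_list : List Int) (max_zeroes : Int) (max_ones : Int) (pulse_length : Int), Dom_split_run_length_list run_length_list max_zeroes max_ones pulse_length → Spec_split_run_length_list run_length_list max_zeroes max_ones pulse_length (split_run_length_list run_length_list max_zeroes max_ones pulse_length)

-- ===== LEMMAS AND PROOFS =====

def pvGA (rl : List Int) (zl ol : Int) (st : List (List Int) × Int × Bool) (iv : Int × Int) : List (List Int) × Int × Bool :=
  let st1 : List (List Int) × Int × Bool :=
    if iv.2 > zl ∧ PySem.Int.mod iv.1 2 = 1 then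
      ((if st.2.2 = false then st.1 ++ [PySem.List.slice rl (some st.2.1) (some iv.1)] else st.1),
       iv.1 + 1, false)
    else st
  if iv.2 > ol ∧ PySem.Int.mod iv.1 2 = 0 then (st1.1, st1.2.1, true) else st1

def pvFinishA (rl : List Int) (st : List (List Int) × Int × Bool) : List (List Int) :=
  if st.2.2 = false then st.1 ++ [PySem.List.slice rl (some st.2.1) none] else st.1

def pvStepB (rl : List Int) (ol : Int) (st : List (List Int) × Int) (e : Int) : List (List Int) × Int :=
  ((if (PySem.List.pyRange st.2 e 2).any (fun j => decide (PySem.List.pyGetD rl j 0 > ol)) = false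
    then st.1 ++ [PySem.List.slice rl (some st.2) (some e)] else st.1),
   e + 1)

def pvAnyB (rl : List Int) (ol : Int) (s e : Int) : Bool :=
  (PySem.List.pyRange s e 2).any (fun j => decide (PySem.List.pyGetD rl j 0 > ol))

def pvRemCuts (rl : List Int) (zl : Int) (b : Nat) : List Int :=
  (PySem.List.pyRange (if b % 2 = 1 then (b : Int) else (b : Int) + 1) (rl.length : Int) 2).filter
    (fun j => decide (PySem.List.pyGetD rl j 0 > zl))

lemma pvPr2_nil (a b : Int) (h : b ≤ a) : PySem.List.pyRange a b 2 = [] := by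
  rw [PySem.List.pyRange_of_pos a b (by norm_num)]
  rw [if_neg (by omega)]
  simp

lemma pvPr2_cons (a b : Int) (h : a < b) :
    PySem.List.pyRange a b 2 = a :: PySem.List.pyRange (a + 2) b 2 := by
  rw [PySem.List.pyRange_of_pos a b (by norm_num), PySem.List.pyRange_of_pos (a+2) b (by norm_num)]
  have hc : (if a < b then ((b - a + 2 - 1) / 2).toNat else 0)
      = (if a + 2 < b then ((b - (a+2) + 2 - 1) / 2).toNat else 0) + 1 := by
    split_ifs <;> omega
  rw [hc, List.range_succ_eq_map]
  simp only [List.map_cons, List.map_map]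
  refine congrArg₂ _ (by push_cast; ring) (List.map_congr_left ?_)
  intro x _
  simp [Function.comp, Nat.succ_eq_add_one]
  ring

lemma pvPr2_snoc (a b : Int) (h : a ≤ b) (hd : (2 : Int) ∣ b - a) :
    PySem.List.pyRange a (b + 1) 2 = PySem.List.pyRange a b 2 ++ [b] := by
  rw [PySem.List.pyRange_of_pos a (b+1) (by norm_num), PySem.List.pyRange_of_pos a b (by norm_num)]
  have hc : (if a < b + 1 then ((b + 1 - a + 2 - 1) / 2).toNat else 0)
      = (if a < b then ((b - a + 2 - 1) / 2).toNat else 0) + 1 := by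
    split_ifs <;> omega
  rw [hc, List.range_succ]
  simp
  omega

lemma pvPr2_ext (a b : Int) (hd : ¬ (2 : Int) ∣ b - a) :
    PySem.List.pyRange a (b + 1) 2 = PySem.List.pyRange a b 2 := by
  rw [PySem.List.pyRange_of_pos a (b+1) (by norm_num), PySem.List.pyRange_of_pos a b (by norm_num)]
  have hc : (if a < b + 1 then ((b + 1 - a + 2 - 1) / 2).toNat else 0)
      = (if a < b then ((b - a + 2 - 1) / 2).toNat else 0) := by
    split_ifs <;> omega
  rw [hc]

lemma pvMain (rl : List Int) (zl ol : Int) (xs : List Int) :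
    ∀ (b start : Nat) (acc : List (List Int)),
      rl.drop b = xs → b ≤ rl.length → start % 2 = 0 → start ≤ b →
      (∀ k : Nat, start ≤ k → k < b → k % 2 = 1 → ¬ (PySem.List.pyGetD rl (k : Int) 0 > zl)) →
      pvFinishA rl (List.foldl (pvGA rl zl ol)
          (acc, ((start : Nat) : Int), pvAnyB rl ol (start : Int) (b : Int))
          (PySem.List.enumerate xs (b : Int)))
        = (List.foldl (pvStepB rl ol) (acc, ((start : Nat) : Int))
            (pvRemCuts rl zl b ++ [(rl.length : Int)])).1 := by
  induction xs with
  | nil =>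
    intro b start acc hdrop hble hst2 hsb hnc
    have hbn : b = rl.length := by
      have := congrArg List.length hdrop
      simp at this; omega
    subst hbn
    have hrem : pvRemCuts rl zl rl.length = [] := by
      unfold pvRemCuts
      split_ifs <;> rw [pvPr2_nil _ _ (by omega)] <;> rfl
    rw [hrem]
    simp only [PySem.List.enumerate_nil, List.foldl_nil, List.nil_append, List.foldl_cons,
      pvFinishA, pvStepB, pvAnyB]
    by_cases hany : (PySem.List.pyRange (start : Int) (rl.length : Int) 2).any
        (fun j => decide (PySem.List.pyGetD rl j 0 > ol)) = false
    · rw [if_pos hany, if_pos hany]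
      have hslice : PySem.List.slice rl (some (start : Int)) none
          = PySem.List.slice rl (some (start : Int)) (some (rl.length : Int)) := by
        rw [PySem.List.slice_from_natCast, PySem.List.slice_natCast]
        rw [List.take_of_length_le (by simp)]
      rw [hslice]
    · rw [if_neg hany, if_neg hany]
  | cons v xs ih =>
    intro b start acc hdrop hble hst2 hsb hnc
    have hblt : b < rl.length := by
      have := congrArg List.length hdrop
      simp at this; omega
    have hdrop' : rl.drop (b + 1) = xs := by
      have h1 : rl.drop (b+1) = (rl.drop b).drop 1 := by rw [List.drop_drop]
      rw [h1, hdrop]; rfl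
    have hv : PySem.List.pyGetD rl (b : Int) 0 = v := by
      rw [PySem.List.pyGetD_natCast]
      have h : (List.drop b rl)[0]? = rl[b + 0]? := List.getElem?_drop
      rw [hdrop] at h
      simp at h
      simp [List.getD_eq_getElem?_getD, ← h]
    have hmod : ∀ m : Nat, PySem.Int.mod ((m : Nat) : Int) 2 = ((m % 2 : Nat) : Int) := by
      intro m; exact_mod_cast PySem.Int.mod_natCast m 2
    rw [PySem.List.enumerate_cons, List.foldl_cons]
    rcases Nat.even_or_odd b with hbe | hbo
    · -- b even: the zero-split branch cannot fire
      have hb2 : b % 2 = 0 := by rcases hbe with ⟨t, ht⟩; omega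
      have hdvd : (2 : Int) ∣ (b : Int) - (start : Int) := ⟨(((b - start) / 2 : Nat) : Int), by omega⟩
      have hsnoc := pvPr2_snoc (start : Int) (b : Int) (by exact_mod_cast hsb) hdvd
      have hga : pvGA rl zl ol (acc, ((start : Nat) : Int), pvAnyB rl ol (start : Int) (b : Int)) ((b : Int), v)
          = (acc, ((start : Nat) : Int), pvAnyB rl ol (start : Int) ((b : Int) + 1)) := by
        simp only [pvGA, hmod b, hb2, Nat.cast_zero, pvAnyB]
        norm_num
        rw [hsnoc, List.any_append]
        by_cases hvo : v > ol
        · simp [hvo, hv]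
        · simp [hvo, hv]
      rw [hga]
      have hrem : pvRemCuts rl zl b = pvRemCuts rl zl (b + 1) := by
        unfold pvRemCuts
        rw [if_neg (by omega), if_pos (by omega)]
        push_cast
        rfl
      rw [hrem]
      have h := ih (b+1) start acc hdrop' (by omega) hst2 (by omega)
        (fun k h1 h2 h3 => by
          rcases Nat.lt_succ_iff_lt_or_eq.mp h2 with h | h
          · exact hnc k h1 h h3
          · subst h; omega)
      rw [show ((b : Int) + 1) = (((b + 1 : Nat) : Nat) : Int) by push_cast; ring]
      exact h
    · -- b odd: the ones branch cannot fire
      have hb2 : b % 2 = 1 := by rcases hbo with ⟨t, ht⟩; omega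
      by_cases hvz : v > zl
      · -- a cut at b
        have hga : pvGA rl zl ol (acc, ((start : Nat) : Int), pvAnyB rl ol (start : Int) (b : Int)) ((b : Int), v)
            = ((if pvAnyB rl ol (start : Int) (b : Int) = false
                  then acc ++ [PySem.List.slice rl (some ((start : Nat) : Int)) (some (b : Int))] else acc),
               (b : Int) + 1, false) := by
          simp only [pvGA, hmod b, hb2, Nat.cast_one]
          norm_num [hvz]
        rw [hga]
        have hrem : pvRemCuts rl zl b = (b : Int) :: pvRemCuts rl zl (b + 1) := by
          unfold pvRemCuts
          rw [if_pos hb2, if_neg (by omega)]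
          rw [pvPr2_cons _ _ (by exact_mod_cast hblt)]
          rw [List.filter_cons, if_pos (by simp [hv, hvz])]
          push_cast
          rfl
        rw [hrem, List.cons_append, List.foldl_cons]
        have hstep : pvStepB rl ol (acc, ((start : Nat) : Int)) (b : Int)
            = ((if pvAnyB rl ol (start : Int) (b : Int) = false
                  then acc ++ [PySem.List.slice rl (some ((start : Nat) : Int)) (some (b : Int))] else acc),
               (b : Int) + 1) := by
          unfold pvStepB pvAnyB; rfl
        rw [hstep]
        have hfalse : pvAnyB rl ol (((b+1 : Nat) : Nat) : Int) (((b+1 : Nat) : Nat) : Int) = false := by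
          unfold pvAnyB; rw [pvPr2_nil _ _ le_rfl]; rfl
        have h := ih (b+1) (b+1)
          (if pvAnyB rl ol (start : Int) (b : Int) = false
             then acc ++ [PySem.List.slice rl (some ((start : Nat) : Int)) (some (b : Int))] else acc)
          hdrop' (by omega) (by omega) (by omega) (fun k h1 h2 h3 => by omega)
        rw [hfalse] at h
        rw [show ((b : Int) + 1) = (((b + 1 : Nat) : Nat) : Int) by push_cast; ring]
        exact h
      · -- no cut at b
        have hodd : ¬ (2 : Int) ∣ (b : Int) - (start : Int) := by
          rintro ⟨c, hc⟩; omega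
        have hga : pvGA rl zl ol (acc, ((start : Nat) : Int), pvAnyB rl ol (start : Int) (b : Int)) ((b : Int), v)
            = (acc, ((start : Nat) : Int), pvAnyB rl ol (start : Int) ((b : Int) + 1)) := by
          simp only [pvGA, hmod b, hb2, Nat.cast_one, pvAnyB]
          norm_num [hvz]
          rw [pvPr2_ext _ _ hodd]
        rw [hga]
        have hrem : pvRemCuts rl zl b = pvRemCuts rl zl (b + 1) := by
          unfold pvRemCuts
          rw [if_pos hb2, if_neg (by omega)]
          rw [pvPr2_cons _ _ (by exact_mod_cast hblt)]
          rw [List.filter_cons, if_neg (by simp [hv, hvz])]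
          push_cast
          rfl
        rw [hrem]
        have h := ih (b+1) start acc hdrop' (by omega) hst2 (by omega)
          (fun k h1 h2 h3 => by
            rcases Nat.lt_succ_iff_lt_or_eq.mp h2 with h | h
            · exact hnc k h1 h h3
            · subst h; rw [hv]; exact hvz)
        rw [show ((b : Int) + 1) = (((b + 1 : Nat) : Nat) : Int) by push_cast; ring]
        exact h

-- ===== VERDICT (by name: the statement is the Claim_ definition above) =====
theorem split_run_length_list_spec : Claim_equal_split_run_length_list := by
  intro rl mz mo pl _hdom
  show split_run_length_list rl mz mo pl = split_run_length_list_alt rl mz mo pl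
  have hA : split_run_length_list rl mz mo pl
      = pvFinishA rl (List.foldl (pvGA rl (mz * pl) (mo * pl)) ([], 0, false)
          (PySem.List.enumerate rl 0)) := rfl
  have hB : split_run_length_list_alt rl mz mo pl
      = (List.foldl (pvStepB rl (mo * pl)) ([], 0)
          (((PySem.List.pyRange 1 (rl.length : Int) 2).filter
              (fun j => decide (PySem.List.pyGetD rl j 0 > mz * pl))) ++ [(rl.length : Int)])).1 := rfl
  have h00 : pvAnyB rl (mo * pl) (((0 : Nat) : Nat) : Int) (((0 : Nat) : Nat) : Int) = false := by
    unfold pvAnyB; rw [pvPr2_nil _ _ le_rfl]; rfl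
  have hrc : pvRemCuts rl (mz * pl) 0
      = (PySem.List.pyRange 1 (rl.length : Int) 2).filter
          (fun j => decide (PySem.List.pyGetD rl j 0 > mz * pl)) := by
    unfold pvRemCuts
    norm_num
  have h := pvMain rl (mz * pl) (mo * pl) rl 0 0 []
    List.drop_zero (by omega) rfl (by omega)
    (fun k _ h2 _ => absurd h2 (by omega))
  rw [h00, hrc] at h
  simp only [Nat.cast_zero] at h
  rw [hA, hB]
  exact h
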